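-- pv_equiv track=rewrite | github.com/robwestz/sandboxdatacenter | the_orchestrator/THE_A_TEAM/a_team_orchestrator.py | _has_duplication
-- ===== SOURCE A (Python) =====
-- def _has_duplication(content: str) -> bool:
--     """Check for code duplication (we hate repetition unless it's intentional patterns)"""
--     lines = content.split("\n")
--     seen = {}
--
--     for line in lines:
--         if len(line.strip()) > 20:  # Only check substantial lines
--             if line.strip() in seen:
--                 seen[line.strip()] += 1
--             else:
--                 seen[line.strip()] = 1
--
--     # If any line appears more than 3 times, it's duplication
--     return any(count > 3 for count in seen.values())
-- ===== SOURCE B (Python) =====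
-- def _has_duplication(content: str) -> bool:
--     """Check for code duplication (we hate repetition unless it's intentional patterns)"""
--     subs = sorted(s for s in (line.strip() for line in content.split("\n")) if len(s) > 20)
--     prev, run = "", 0
--     for s in subs:
--         run = run + 1 if s == prev else 1
--         prev = s
--         if run > 3:
--             return True
--     return False
-- ===== Notes on version B (the rewrite author's own statement) =====
-- stated objective: alternative
-- what changed: Replaces the hash-map counting pass with sort-then-scan: the substantial stripped lines are collected, sorted, and a single linear pass detects a run of 4 equal consecutive lines, with early exit.
import Mathlib
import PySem

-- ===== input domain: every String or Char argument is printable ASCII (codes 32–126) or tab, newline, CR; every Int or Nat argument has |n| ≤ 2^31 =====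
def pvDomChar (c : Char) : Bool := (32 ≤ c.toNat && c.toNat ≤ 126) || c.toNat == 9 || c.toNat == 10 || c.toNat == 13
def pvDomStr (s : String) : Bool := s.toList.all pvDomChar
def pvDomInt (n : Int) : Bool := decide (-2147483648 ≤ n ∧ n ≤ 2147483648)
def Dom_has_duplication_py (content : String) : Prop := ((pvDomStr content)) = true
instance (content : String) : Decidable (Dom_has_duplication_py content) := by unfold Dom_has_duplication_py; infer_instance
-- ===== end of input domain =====

-- B replaces A's hash-map counting with sort-then-run-scan (different algorithm, similar cost).

-- ===== PORT A =====
-- literal port of A: split on "\n" (sep ≠ "", so split? is always some), one pass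
-- building the count dict with the in/else branch, then any(count > 3) over the values
def has_duplication_py (content : String) : Bool :=
  let lines := (PySem.Str.split? content "\n").getD []
  -- Python re-evaluates line.strip() at each use; the port does the same
  let seen := lines.foldl
    (fun d line =>
      if 20 < PySem.Str.len (PySem.Str.strip line) then
        if d.contains (PySem.Str.strip line) then
          d.insert (PySem.Str.strip line) (d.getD (PySem.Str.strip line) 0 + 1)
        else d.insert (PySem.Str.strip line) (1 : Int)
      else d)
    PySem.Dict.empty
  seen.values.any (fun c => decide (3 < c))

-- ===== PORT B =====
-- the early-exit run scan over the sorted list: prev, run are the loop state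
def pvRunScan : String → Int → List String → Bool
  | _, _, [] => false
  | prev, run, s :: rest =>
    let run' := if s == prev then run + 1 else 1
    if 3 < run' then true else pvRunScan s run' rest

def has_duplication_py_alt (content : String) : Bool :=
  let subs := (((PySem.Str.split? content "\n").getD []).map PySem.Str.strip).filter
    (fun s => decide (20 < PySem.Str.len s))
  pvRunScan "" 0 (PySem.List.sorted subs (fun x => x))

-- ===== PRECONDITION & SPEC =====
def Spec_has_duplication_py (content : String) (out : Bool) : Prop := out = has_duplication_py_alt content
instance (content : String) (out : Bool) : Decidable (Spec_has_duplication_py content out) := by unfold Spec_has_duplication_py; infer_instance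

-- ===== CLAIM (what is proved, stated in full; the proofs are below) =====
def Claim_equal_has_duplication_py : Prop := ∀ (content : String), Dom_has_duplication_py content → Spec_has_duplication_py content (has_duplication_py content)

-- ===== LEMMAS AND PROOFS =====

-- A's guarded loop over all lines is the unguarded counting loop over the filtered stripped lines
theorem pv_fold_lines (l : List String) (d : PySem.Dict String Int) :
    l.foldl
      (fun d line =>
        if 20 < PySem.Str.len (PySem.Str.strip line) then
          if d.contains (PySem.Str.strip line) then
            d.insert (PySem.Str.strip line) (d.getD (PySem.Str.strip line) 0 + 1)
          else d.insert (PySem.Str.strip line) (1 : Int)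
        else d) d
      = ((l.map PySem.Str.strip).filter (fun s => decide (20 < PySem.Str.len s))).foldl
          (fun d s => if d.contains s then d.insert s (d.getD s 0 + 1) else d.insert s (1 : Int)) d := by
  induction l generalizing d with
  | nil => simp
  | cons x t ih =>
    simp only [List.foldl_cons, List.map_cons, List.filter_cons, decide_eq_true_eq]
    by_cases h : 20 < PySem.Str.len (PySem.Str.strip x)
    · rw [if_pos h, if_pos h, List.foldl_cons, ih]
    · rw [if_neg h, if_neg h, ih]

-- the contains-branch of A's loop is the plain insert-getD step
theorem pv_step_eq (d : PySem.Dict String Int) (s : String) :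
    (if d.contains s then d.insert s (d.getD s 0 + 1) else d.insert s (1 : Int))
      = d.insert s (d.getD s 0 + 1) := by
  by_cases h : d.contains s = true
  · simp [h]
  · simp only [Bool.not_eq_true] at h
    simp [h, PySem.Dict.getD_of_not_contains d 0 h]

-- A's dict build is the standard counter
theorem pv_fold_eq_counter (subs : List String) :
    subs.foldl (fun d s =>
        if d.contains s then d.insert s (d.getD s 0 + 1) else d.insert s (1 : Int))
        PySem.Dict.empty
      = PySem.Dict.counter subs := by
  rw [show (fun (d : PySem.Dict String Int) s =>
        if d.contains s then d.insert s (d.getD s 0 + 1) else d.insert s (1 : Int))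
      = fun d s => d.insert s (d.getD s 0 + 1) from
    funext fun d => funext fun s => pv_step_eq d s]
  exact PySem.Dict.foldl_insert_getD_add_one_eq_counter subs

-- key run-scan characterisation on a sorted list
theorem pv_runScan_iff (l : List String) (prev : String) (run : Int)
    (hsorted : l.Pairwise (· ≤ ·)) (hle : ∀ x ∈ l, prev ≤ x) (hrun : run ≤ 3) :
    pvRunScan prev run l = true ↔
      (3 < run + l.count prev ∨ ∃ x ∈ l, x ≠ prev ∧ 3 < (l.count x : Int)) := by
  induction l generalizing prev run with
  | nil => simp [pvRunScan]; omega
  | cons s rest ih =>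
    rw [List.pairwise_cons] at hsorted
    obtain ⟨hsle, hrest⟩ := hsorted
    have hps : prev ≤ s := hle s (List.mem_cons_self ..)
    by_cases hesp : s = prev
    · subst hesp
      simp only [pvRunScan, beq_self_eq_true, if_true]
      by_cases hbig : (3 : Int) < run + 1
      · simp only [hbig, if_true]
        constructor
        · intro _
          left
          have : (0 : Int) ≤ (rest.count s : Int) := by positivity
          simp
          omega
        · intro _; trivial
      · simp only [hbig, if_false]
        rw [ih s (run + 1) hrest (fun x hx => hsle x hx) (by omega)]
        constructor
        · rintro (h | ⟨x, hx, hxs, hc⟩)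
          · left; simp; omega
          · right
            refine ⟨x, List.mem_cons_of_mem _ hx, hxs, ?_⟩
            rw [List.count_cons, if_neg (fun h => hxs (eq_of_beq h).symm)]
            omega
        · rintro (h | ⟨x, hx, hxs, hc⟩)
          · left; simp at h ⊢; omega
          · rcases List.mem_cons.mp hx with rfl | hx'
            · exact absurd rfl hxs
            · right
              refine ⟨x, hx', hxs, ?_⟩
              rw [List.count_cons, if_neg (fun h => hxs (eq_of_beq h).symm)] at hc
              exact hc
    · -- s ≠ prev: prev does not occur in s :: rest
      have hpnotin : prev ∉ s :: rest := by
        intro hmem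
        rcases List.mem_cons.mp hmem with h | h
        · exact hesp h.symm
        · exact hesp (le_antisymm (hsle prev h) hps)
      have hcp : (s :: rest).count prev = 0 := List.count_eq_zero.mpr hpnotin
      simp only [pvRunScan, beq_iff_eq, hesp, if_false]
      have h13 : ¬ (3 : Int) < 1 := by omega
      simp only [h13, if_false]
      rw [ih s 1 hrest (fun x hx => hsle x hx) (by omega)]
      rw [hcp]
      constructor
      · rintro (h | ⟨x, hx, hxs, hc⟩)
        · right
          refine ⟨s, List.mem_cons_self .., fun h' => hesp h', ?_⟩
          rw [List.count_cons]; simp; omega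
        · right
          have hxp : x ≠ prev := fun h' => hpnotin (h' ▸ List.mem_cons_of_mem _ hx)
          refine ⟨x, List.mem_cons_of_mem _ hx, hxp, ?_⟩
          rw [List.count_cons, if_neg (fun h => hxs (eq_of_beq h).symm)]
          omega
      · rintro (h | ⟨x, hx, hxp, hc⟩)
        · push_cast at h; omega
        · rcases List.mem_cons.mp hx with rfl | hx'
          · left
            rw [List.count_cons] at hc; simp at hc; omega
          · by_cases hxs : x = s
            · subst hxs
              left
              rw [List.count_cons] at hc; simp at hc; omega
            · right
              refine ⟨x, hx', hxs, ?_⟩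
              rw [List.count_cons, if_neg (fun h => hxs (eq_of_beq h).symm)] at hc
              exact hc

theorem pv_empty_le (s : String) : "" ≤ s := by
  rw [String.le_iff_toList_le]
  cases h : s.toList with
  | nil => simp
  | cons c t => exact le_of_lt (List.Lex.nil ..)

theorem has_duplication_py_spec : Claim_equal_has_duplication_py := by
  intro content _
  unfold Spec_has_duplication_py has_duplication_py has_duplication_py_alt
  set lines := (PySem.Str.split? content "\n").getD [] with hlines
  set subs := (lines.map PySem.Str.strip).filter (fun s => decide (20 < PySem.Str.len s)) with hsubs
  set l := PySem.List.sorted subs (fun x => x) with hl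
  have hperm : l.Perm subs := PySem.List.sorted_perm subs (fun x => x) false
  -- elements of subs are long, hence nonempty
  have hmemlen : ∀ x ∈ subs, 20 < PySem.Str.len x := by
    intro x hx
    rw [hsubs, List.mem_filter] at hx
    simpa using hx.2
  have hne : ∀ x ∈ subs, x ≠ "" := by
    intro x hx h0
    have := hmemlen x hx
    rw [h0] at this
    simp [PySem.Str.len] at this
  -- A side: the loop is the counter of subs
  have hA : (lines.foldl
      (fun d line =>
        if 20 < PySem.Str.len (PySem.Str.strip line) then
          if d.contains (PySem.Str.strip line) then
            d.insert (PySem.Str.strip line) (d.getD (PySem.Str.strip line) 0 + 1)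
          else d.insert (PySem.Str.strip line) (1 : Int)
        else d)
      PySem.Dict.empty)
      = PySem.Dict.counter subs := by
    rw [pv_fold_lines lines PySem.Dict.empty, hsubs]
    exact pv_fold_eq_counter subs
  have hAiff : ((PySem.Dict.counter subs).values.any (fun c => decide (3 < c))) = true ↔
      ∃ x ∈ subs, 3 < ((subs.count x : Int)) := by
    rw [List.any_eq_true]
    constructor
    · rintro ⟨c, hc, hp⟩
      have : c ∈ (PySem.Dict.counter subs).items.map Prod.snd := hc
      rw [PySem.Dict.items_counter] at this
      simp only [List.map_map, List.mem_map] at this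
      obtain ⟨k, hk, rfl⟩ := this
      exact ⟨k, (PySem.Set.mem_ofList subs k).mp hk, by simpa using hp⟩
    · rintro ⟨x, hx, hp⟩
      refine ⟨(subs.count x : Int), ?_, by simpa using hp⟩
      show _ ∈ (PySem.Dict.counter subs).items.map Prod.snd
      rw [PySem.Dict.items_counter]
      simp only [List.map_map, List.mem_map]
      exact ⟨x, (PySem.Set.mem_ofList subs x).mpr hx, rfl⟩
  -- B side: the run scan on the sorted list
  have hBiff : pvRunScan "" 0 l = true ↔ ∃ x ∈ subs, 3 < ((subs.count x : Int)) := by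
    rw [pv_runScan_iff l "" 0 (PySem.List.sorted_pairwise subs (fun x => x))
      (fun x _ => pv_empty_le x) (by omega)]
    have hcnt0 : l.count "" = 0 := by
      rw [hperm.count_eq]
      exact List.count_eq_zero.mpr (fun h => hne "" h rfl)
    rw [hcnt0]
    constructor
    · rintro (h | ⟨x, hx, _, hc⟩)
      · omega
      · exact ⟨x, hperm.mem_iff.mp hx, by rw [← hperm.count_eq]; exact hc⟩
    · rintro ⟨x, hx, hc⟩
      right
      exact ⟨x, hperm.mem_iff.mpr hx, hne x hx, by rw [hperm.count_eq]; exact hc⟩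
  simp only [hA]
  rw [Bool.eq_iff_iff]
  exact hAiff.trans hBiff.symm
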